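-- pv_equiv track=rewrite | github.com/imbus/testbench-requirement-service | download_dependencies.py | parse_requires_dist
-- ===== SOURCE A (Python) =====
-- def parse_requires_dist(metadata_text: str) -> list[str]:
--     """Extract Requires-Dist entries from wheel METADATA content."""
--     requires: list[str] = []
--     current: str | None = None
--     for line in metadata_text.splitlines():
--         if line.startswith("Requires-Dist:"):
--             if current:
--                 requires.append(current)
--             current = line[len("Requires-Dist:") :].strip()
--         elif current and line.startswith(" "):
--             current += " " + line.strip()
--         elif current:
--             requires.append(current)
--             current = None
--     if current:
--         requires.append(current)
--     return requires
-- ===== SOURCE B (Python) =====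
-- def parse_requires_dist(metadata_text: str) -> list[str]:
--     """Extract Requires-Dist entries from wheel METADATA content."""
--     lines = metadata_text.splitlines()
--     requires: list[str] = []
--     i = 0
--     while i < len(lines):
--         line = lines[i]
--         i += 1
--         if line.startswith("Requires-Dist:"):
--             value = line[len("Requires-Dist:"):].strip()
--             if value:
--                 while i < len(lines) and lines[i].startswith(" "):
--                     value = value + " " + lines[i].strip()
--                     i += 1
--                 requires.append(value)
--     return requires
-- ===== Notes on version B (the rewrite author's own statement) =====
-- stated objective: alternative
-- what changed: Replaces A's single fold carrying an Optional current entry with deferred flushes by an index-based outer while loop that, on each non-empty Requires-Dist line, runs an inner while loop absorbing the indented continuation lines and appends the finished entry immediately.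
import Mathlib
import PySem

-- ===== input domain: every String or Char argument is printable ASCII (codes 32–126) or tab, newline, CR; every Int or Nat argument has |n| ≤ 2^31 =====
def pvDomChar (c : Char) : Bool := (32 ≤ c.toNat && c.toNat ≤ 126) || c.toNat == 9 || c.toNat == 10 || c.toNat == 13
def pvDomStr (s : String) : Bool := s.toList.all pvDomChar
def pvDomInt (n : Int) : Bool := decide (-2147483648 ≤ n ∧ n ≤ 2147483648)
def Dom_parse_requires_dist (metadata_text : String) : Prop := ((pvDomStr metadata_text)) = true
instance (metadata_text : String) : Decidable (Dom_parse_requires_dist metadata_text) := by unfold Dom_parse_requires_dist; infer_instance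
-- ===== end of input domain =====

-- B replaces A's carried-`current` flush machine by an index-style nested loop: an outer
-- pass over the lines that, on each non-empty 'Requires-Dist:' value, runs an inner loop
-- absorbing the indented continuation lines and appends the finished entry at once.

-- ===== PORT A =====
-- Python truthiness of `current : str | None`
def pvTruthy : Option String → Bool
  | none => false
  | some s => s ≠ ""

-- one iteration of A's for-loop: state = (requires, current)
def pvAStep (st : List String × Option String) (line : String) : List String × Option String :=
  if PySem.Str.startswith line "Requires-Dist:" then
    ((if pvTruthy st.2 then st.1 ++ [st.2.getD ""] else st.1),
     some (PySem.Str.strip (PySem.Str.slice line (some 14) none)))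
  else if pvTruthy st.2 && PySem.Str.startswith line " " then
    (st.1, some (st.2.getD "" ++ " " ++ PySem.Str.strip line))
  else if pvTruthy st.2 then
    (st.1 ++ [st.2.getD ""], none)
  else
    (st.1, st.2)

def parse_requires_dist (metadata_text : String) : List String :=
  let st := (PySem.Str.splitlines metadata_text).foldl pvAStep ([], none)
  if pvTruthy st.2 then st.1 ++ [st.2.getD ""] else st.1

-- ===== PORT B =====
-- inner while loop: absorb continuation lines, return (value, remaining lines)
def pvBInner (value : String) : List String → String × List String
  | [] => (value, [])
  | l :: rest =>
    if PySem.Str.startswith l " " then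
      pvBInner (value ++ " " ++ PySem.Str.strip l) rest
    else (value, l :: rest)

theorem pvBInner_length (value : String) (xs : List String) :
    (pvBInner value xs).2.length ≤ xs.length := by
  induction xs generalizing value with
  | nil => simp [pvBInner]
  | cons l rest ih =>
    simp only [pvBInner]
    split
    · exact le_trans (ih _) (Nat.le_succ _)
    · simp

-- outer while loop over the remaining lines
def pvBOuter : List String → List String
  | [] => []
  | line :: rest =>
    if PySem.Str.startswith line "Requires-Dist:" then
      let value := PySem.Str.strip (PySem.Str.slice line (some 14) none)
      if value ≠ "" then
        let p := pvBInner value rest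
        p.1 :: pvBOuter p.2
      else pvBOuter rest
    else pvBOuter rest
termination_by xs => xs.length
decreasing_by
  · exact Nat.lt_succ_of_le (pvBInner_length _ _)
  · simp
  · simp

def parse_requires_dist_alt (metadata_text : String) : List String :=
  pvBOuter (PySem.Str.splitlines metadata_text)

-- ===== PRECONDITION & SPEC =====
def Spec_parse_requires_dist (metadata_text : String) (out : List String) : Prop := out = parse_requires_dist_alt metadata_text
instance (metadata_text : String) (out : List String) : Decidable (Spec_parse_requires_dist metadata_text out) := by unfold Spec_parse_requires_dist; infer_instance

-- ===== CLAIM (what is proved, stated in full; the proofs are below) =====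
def Claim_equal_parse_requires_dist : Prop := ∀ (metadata_text : String), Dom_parse_requires_dist metadata_text → Spec_parse_requires_dist metadata_text (parse_requires_dist metadata_text)

-- ===== LEMMAS AND PROOFS =====

-- A's final flush
def pvFinish (st : List String × Option String) : List String :=
  if pvTruthy st.2 then st.1 ++ [st.2.getD ""] else st.1

-- a line starting with " " does not start with "Requires-Dist:"
theorem pv_space_not_rd (l : String) (h : PySem.Str.startswith l " " = true) :
    PySem.Str.startswith l "Requires-Dist:" = false := by
  simp only [PySem.Str.startswith_eq, PySem.Chars.startswith_iff] at h
  rw [← Bool.not_eq_true]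
  simp only [PySem.Str.startswith_eq, PySem.Chars.startswith_iff]
  intro hr
  obtain ⟨t, ht⟩ := h
  obtain ⟨u, hu⟩ := hr
  rw [← ht] at hu
  simp at hu

-- a string with a nonempty prefix is nonempty
theorem pv_append_ne (c x : String) (hc : c ≠ "") : c ++ x ≠ "" := by
  intro h
  apply hc
  have h1 := congrArg String.toList h
  simp at h1
  exact h1.1

theorem pv_main (lines : List String) :
    (∀ req cur, pvTruthy cur = false →
      pvFinish (lines.foldl pvAStep (req, cur)) = req ++ pvBOuter lines) ∧
    (∀ req c, c ≠ "" →
      pvFinish (lines.foldl pvAStep (req, some c)) =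
        req ++ (pvBInner c lines).1 :: pvBOuter (pvBInner c lines).2) := by
  induction lines with
  | nil =>
    constructor
    · intro req cur hcur
      simp [pvFinish, pvBOuter, hcur]
    · intro req c hc
      simp [pvFinish, pvBInner, pvBOuter, pvTruthy, hc]
  | cons l rest ih =>
    obtain ⟨ihP, ihQ⟩ := ih
    constructor
    · intro req cur hcur
      by_cases hrd : PySem.Str.startswith l "Requires-Dist:" = true
      · have hstep : pvAStep (req, cur) l =
            (req, some (PySem.Str.strip (PySem.Str.slice l (some 14) none))) := by
          simp [pvAStep, hcur]
          simp at hrd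
          simp [hrd]
        simp at hrd
        by_cases hv : PySem.Str.strip (PySem.Str.slice l (some 14) none) = ""
        · simp only [List.foldl_cons, hstep]
          rw [ihP req _ (by simp [pvTruthy, hv])]
          simp [pvBOuter, hrd, hv]
        · simp only [List.foldl_cons, hstep]
          rw [ihQ req _ hv]
          simp [pvBOuter, hrd, hv]
      · have hstep : pvAStep (req, cur) l = (req, cur) := by
          simp [pvAStep, hcur]
          simp at hrd
          simp [hrd]
        simp at hrd
        simp only [List.foldl_cons, hstep]
        rw [ihP req cur hcur]
        simp [pvBOuter, hrd]
    · intro req c hc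
      have htr : pvTruthy (some c) = true := by simp [pvTruthy, hc]
      by_cases hrd : PySem.Str.startswith l "Requires-Dist:" = true
      · have hsp : PySem.Str.startswith l " " = false := by
          by_contra hx
          rw [Bool.not_eq_false] at hx
          rw [pv_space_not_rd l hx] at hrd
          exact Bool.false_ne_true hrd
        have hstep : pvAStep (req, some c) l =
            (req ++ [c], some (PySem.Str.strip (PySem.Str.slice l (some 14) none))) := by
          simp [pvAStep, htr]
          simp at hrd
          simp [hrd]
        simp at hrd hsp
        by_cases hv : PySem.Str.strip (PySem.Str.slice l (some 14) none) = ""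
        · simp only [List.foldl_cons, hstep]
          rw [ihP (req ++ [c]) _ (by simp [pvTruthy, hv])]
          simp [pvBOuter, pvBInner, hrd, hsp, hv]
        · simp only [List.foldl_cons, hstep]
          rw [ihQ (req ++ [c]) _ hv]
          simp [pvBOuter, pvBInner, hrd, hsp, hv]
      · by_cases hsp : PySem.Str.startswith l " " = true
        · have hstep : pvAStep (req, some c) l =
              (req, some (c ++ " " ++ PySem.Str.strip l)) := by
            simp [pvAStep, htr]
            simp at hrd hsp
            simp [hrd, hsp]
          have hc' : c ++ " " ++ PySem.Str.strip l ≠ "" :=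
            pv_append_ne _ _ (pv_append_ne _ _ hc)
          simp at hsp
          simp only [List.foldl_cons, hstep]
          rw [ihQ req _ hc']
          simp [pvBInner, hsp]
        · have hstep : pvAStep (req, some c) l = (req ++ [c], none) := by
            simp [pvAStep, htr]
            simp at hrd hsp
            simp [hrd, hsp]
          simp at hrd hsp
          simp only [List.foldl_cons, hstep]
          rw [ihP (req ++ [c]) none rfl]
          simp [pvBOuter, pvBInner, hrd, hsp]

-- ===== VERDICT (by name: the statement is the Claim_ definition above) =====
theorem parse_requires_dist_spec : Claim_equal_parse_requires_dist := by
  intro s _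
  unfold Spec_parse_requires_dist parse_requires_dist parse_requires_dist_alt
  have h := (pv_main (PySem.Str.splitlines s)).1 [] none rfl
  simpa [pvFinish] using h
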